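-- pv_equiv track=rewrite | github.com/Aieyup/GenerativeAiLesoon | Les_01/Tokenizasyon_indexing.py | indexingForTokenizer
-- ===== SOURCE A (Python) =====
-- def indexingForTokenizer(tokenized_text,startindex =0):
--     """
--     Tokenize text for indexing
--     Bu fonksiyon, verilen tokenize edilmiş metinleri indekslemek için kullanılır.
--     Her kelimeye bir indeks atarak, metinleri daha iyi bir şekilde saklamayı sağlar.
--
--     Args:
--         tokenized_text (list): Tokenize edilmiş metin listesi.
--         startindex (int, optional): Başlangıç indeksi. Varsayılan değer 0.
--     example:
--         >>> tokenized_text = [['merhaba', 'dünya'], ['python', 'programlama']]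
--         >>> indexingForTokenizer(tokenized_text)
--         {'merhaba': 0, 'dünya': 1, 'python': 2, 'programlama': 3}
--     """
--     index=startindex
--     word_index ={}
--     for sentence in tokenized_text:
--         for word in sentence:
--             if word not in word_index:
--                 word_index[word]=index
--                 index +=1
--     return word_index
-- ===== SOURCE B (Python) =====
-- def indexingForTokenizer(tokenized_text, startindex=0):
--     words = [w for sentence in tokenized_text for w in sentence]
--     word_index = {}
--     i = startindex
--     while words:
--         w = words[0]
--         word_index[w] = i
--         i += 1
--         words = [x for x in words[1:] if x != w]
--     return word_index
-- ===== Notes on version B (the rewrite author's own statement) =====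
-- stated objective: alternative
-- what changed: B uses selection-by-filtering: repeatedly take the head word of the flattened list, assign it the next index, and filter every remaining copy of it out of the worklist, so no membership test and no seen-set/dict dedup pass exists; A keeps an inline counter with a 'word not in word_index' guard.
import Mathlib
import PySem

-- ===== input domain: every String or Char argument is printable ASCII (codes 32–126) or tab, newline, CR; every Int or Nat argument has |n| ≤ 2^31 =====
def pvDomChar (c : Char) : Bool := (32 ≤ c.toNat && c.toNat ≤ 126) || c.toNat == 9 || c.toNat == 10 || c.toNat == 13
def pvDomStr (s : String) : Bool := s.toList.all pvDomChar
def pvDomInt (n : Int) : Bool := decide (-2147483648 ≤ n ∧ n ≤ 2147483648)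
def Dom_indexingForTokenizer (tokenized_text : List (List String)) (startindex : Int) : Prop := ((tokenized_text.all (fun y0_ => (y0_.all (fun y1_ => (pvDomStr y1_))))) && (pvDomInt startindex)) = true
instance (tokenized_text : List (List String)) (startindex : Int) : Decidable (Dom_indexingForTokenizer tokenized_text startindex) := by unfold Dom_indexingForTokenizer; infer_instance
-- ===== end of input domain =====

-- B replaces A's single pass with an inline counter and membership guard by selection-by-filtering:
-- take the head of the flattened worklist, assign it the next index, filter its copies out, repeat.
-- Same results; different algorithm (no seen-set/membership test), not claimed faster.

-- ===== PORT A =====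
-- state (index, word_index); 'word not in word_index' is the Dict.contains test
def indexingForTokenizer (tokenized_text : List (List String)) (startindex : Int) : List (String × Int) :=
  let st := tokenized_text.foldl
    (fun st sentence => sentence.foldl
      (fun st word =>
        if st.2.contains word then st
        else (st.1 + 1, st.2.insert word st.1)) st)
    (startindex, (PySem.Dict.empty : PySem.Dict String Int))
  st.2.items

-- ===== PORT B =====
-- B's while loop: words nonempty → take words[0], insert it with index i, continue on
-- [x for x in words[1:] if x != w]; terminates because the worklist shrinks.
def pvLoopB : List String → PySem.Dict String Int → Int → PySem.Dict String Int
  | [], word_index, _ => word_index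
  | w :: rest, word_index, i =>
      pvLoopB (rest.filter (fun x => x ≠ w)) (word_index.insert w i) (i + 1)
termination_by words => words.length
decreasing_by
  simp only [List.length_cons, List.length_unattach]
  exact Nat.lt_succ_of_le (le_trans (List.length_filter_le _ _) (by simp))

def indexingForTokenizer_alt (tokenized_text : List (List String)) (startindex : Int) : List (String × Int) :=
  let words := tokenized_text.flatMap (fun sentence => sentence)
  (pvLoopB words PySem.Dict.empty startindex).items

-- ===== PRECONDITION & SPEC =====
def Spec_indexingForTokenizer (tokenized_text : List (List String)) (startindex : Int) (out : List (String × Int)) : Prop := out = indexingForTokenizer_alt tokenized_text startindex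
instance (tokenized_text : List (List String)) (startindex : Int) (out : List (String × Int)) : Decidable (Spec_indexingForTokenizer tokenized_text startindex out) := by unfold Spec_indexingForTokenizer; infer_instance

-- ===== CLAIM (what is proved, stated in full; the proofs are below) =====
def Claim_equal_indexingForTokenizer : Prop := ∀ (tokenized_text : List (List String)) (startindex : Int), Dom_indexingForTokenizer tokenized_text startindex → Spec_indexingForTokenizer tokenized_text startindex (indexingForTokenizer tokenized_text startindex)

-- ===== LEMMAS AND PROOFS =====

-- A's loop step
def pvStep (st : Int × PySem.Dict String Int) (word : String) : Int × PySem.Dict String Int :=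
  if st.2.contains word then st else (st.1 + 1, st.2.insert word st.1)

def pvDictOf (seen : List String) (s : Int) : PySem.Dict String Int :=
  PySem.Dict.mk ((PySem.List.enumerate seen s).map (fun p => (p.2, p.1)))

lemma pvKeys_dictOf (seen : List String) (s : Int) : (pvDictOf seen s).keys = seen := by
  simp only [pvDictOf, PySem.Dict.keys, List.map_map]
  exact PySem.List.map_snd_enumerate seen s

lemma pvContains_dictOf (seen : List String) (s : Int) (w : String) :
    (pvDictOf seen s).contains w = true ↔ w ∈ seen := by
  rw [PySem.Dict.contains_iff_mem_keys, pvKeys_dictOf]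

lemma pvDictOf_snoc (seen : List String) (s : Int) (w : String) (hw : w ∉ seen) :
    (pvDictOf seen s).insert w (s + seen.length) = pvDictOf (seen ++ [w]) s := by
  apply PySem.Dict.ext
  rw [PySem.Dict.items_insert_of_not_contains]
  · simp [pvDictOf, PySem.List.enumerate_append, PySem.List.enumerate_cons,
      PySem.List.enumerate_nil]
  · rw [Bool.eq_false_iff]
    intro hc
    exact hw ((pvContains_dictOf seen s w).mp hc)

lemma pvLoop_inv (ws : List String) (seen : List String) (s : Int) (h : seen.Nodup) :
    ws.foldl pvStep (s + seen.length, pvDictOf seen s) =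
      (s + (PySem.Set.update seen ws).length, pvDictOf (PySem.Set.update seen ws) s) := by
  induction ws generalizing seen with
  | nil => simp [PySem.Set.update]
  | cons w ws ih =>
    rw [List.foldl_cons, PySem.Set.update_cons]
    by_cases hw : w ∈ seen
    · have hc : (pvDictOf seen s).contains w = true := (pvContains_dictOf seen s w).mpr hw
      rw [show pvStep (s + ↑seen.length, pvDictOf seen s) w = (s + ↑seen.length, pvDictOf seen s) by
        simp [pvStep, hc]]
      rw [PySem.Set.add_of_mem hw]
      exact ih seen h
    · have hc : (pvDictOf seen s).contains w = false := by
        rw [← Bool.not_eq_true, ← Bool.coe_iff_coe]; simp [pvContains_dictOf, hw]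
      have hstep : pvStep (s + ↑seen.length, pvDictOf seen s) w
          = (s + ↑(seen ++ [w]).length, pvDictOf (seen ++ [w]) s) := by
        simp only [pvStep, hc, Bool.false_eq_true, if_false]
        rw [pvDictOf_snoc seen s w hw]
        simp
        omega
      rw [hstep, PySem.Set.add_of_not_mem hw]
      exact ih (seen ++ [w]) (by simp [List.nodup_append, h]; exact fun a ha hh => hw (hh ▸ ha))

-- B-side: filtering out an already-seen word does not change Set.update
lemma pvUpdate_filter (l : List String) (s : PySem.Set String) (w : String) (hw : w ∈ s) :
    PySem.Set.update s (l.filter (fun x => x ≠ w)) = PySem.Set.update s l := by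
  induction l generalizing s with
  | nil => rfl
  | cons x l ih =>
    by_cases hx : x = w
    · subst hx
      rw [List.filter_cons_of_neg (by simp), PySem.Set.update_cons, PySem.Set.add_of_mem hw]
      exact ih s hw
    · rw [List.filter_cons_of_pos (by simp [hx]), PySem.Set.update_cons, PySem.Set.update_cons]
      exact ih (PySem.Set.add s x) (by rw [PySem.Set.mem_add]; exact Or.inl hw)

lemma pvUpdate_cons_head (l : List String) (s : PySem.Set String) (w : String) (hw : w ∉ l) :
    PySem.Set.update (w :: s) l = w :: PySem.Set.update s l := by
  induction l generalizing s with
  | nil => rfl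
  | cons x l ih =>
    have hxw : x ≠ w := fun h => hw (h ▸ List.mem_cons_self)
    rw [PySem.Set.update_cons, PySem.Set.update_cons]
    have hadd : PySem.Set.add (w :: s) x = w :: PySem.Set.add s x := by
      rw [PySem.Set.add_eq_ite, PySem.Set.add_eq_ite]
      by_cases hxs : x ∈ s
      · simp [hxs]
      · simp [hxs, hxw]
    rw [hadd]
    exact ih (PySem.Set.add s x) (fun h => hw (List.mem_cons_of_mem x h))

-- first-occurrence dedup satisfies B's selection recursion
lemma pvDedup_cons (w : String) (l : List String) :
    PySem.List.dedup (w :: l) = w :: PySem.List.dedup (l.filter (fun x => x ≠ w)) := by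
  have h1 : PySem.List.dedup (w :: l) = PySem.Set.update [w] l := by
    simp only [PySem.List.dedup_eq_ofList, PySem.Set.ofList_eq_foldl, List.foldl_cons]
    rfl
  rw [h1, ← pvUpdate_filter l [w] w (List.mem_singleton.mpr rfl),
    pvUpdate_cons_head _ _ _ (by simp)]
  simp only [PySem.List.dedup_eq_ofList, PySem.Set.ofList_eq_foldl]
  rfl

-- B's loop invariant: over fresh keys it appends the enumerated dedup
lemma pvLoopB_inv (n : Nat) : ∀ (l : List String), l.length ≤ n →
    ∀ (d : PySem.Dict String Int) (i : Int), (∀ x ∈ l, d.contains x = false) →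
    (pvLoopB l d i).items =
      d.items ++ (PySem.List.enumerate (PySem.List.dedup l) i).map (fun p => (p.2, p.1)) := by
  induction n with
  | zero =>
    intro l hl d i _
    have : l = [] := List.eq_nil_of_length_eq_zero (Nat.le_zero.mp hl)
    subst this
    simp [pvLoopB, PySem.List.dedup, PySem.List.enumerate_nil]
  | succ n ih =>
    intro l hl d i hfresh
    cases l with
    | nil => simp [pvLoopB, PySem.List.dedup, PySem.List.enumerate_nil]
    | cons w rest =>
      rw [pvLoopB]
      have hlen : (rest.filter (fun x => x ≠ w)).length ≤ n :=
        le_trans (List.length_filter_le _ _) (by simpa using Nat.le_of_succ_le_succ hl)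
      have hfresh' : ∀ x ∈ rest.filter (fun x => x ≠ w), (d.insert w i).contains x = false := by
        intro x hx
        rw [List.mem_filter] at hx
        rw [PySem.Dict.contains_insert]
        have hxw : (x == w) = false := by
          simp only [decide_eq_true_eq] at hx
          simp [hx.2]
        rw [hxw, hfresh x (List.mem_cons_of_mem w hx.1)]
        rfl
      rw [ih _ hlen _ _ hfresh', PySem.Dict.items_insert_of_not_contains]
      · rw [pvDedup_cons, PySem.List.enumerate_cons]
        simp
      · exact hfresh w List.mem_cons_self

-- ===== VERDICT (by name: the statement is the Claim_ definition above) =====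
theorem indexingForTokenizer_spec : Claim_equal_indexingForTokenizer := by
  intro tt s _
  unfold Spec_indexingForTokenizer indexingForTokenizer indexingForTokenizer_alt
  have hflat : tt.foldl
      (fun st sentence => sentence.foldl
        (fun st word => if st.2.contains word then st else (st.1 + 1, st.2.insert word st.1)) st)
      (s, (PySem.Dict.empty : PySem.Dict String Int))
      = (tt.flatMap (fun sentence => sentence)).foldl pvStep
          (s, (PySem.Dict.empty : PySem.Dict String Int)) := by
    rw [List.flatMap_id', List.foldl_flatten]
    rfl
  rw [hflat]
  have h0 : ((s, (PySem.Dict.empty : PySem.Dict String Int)) : Int × PySem.Dict String Int)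
      = (s + ([] : List String).length, pvDictOf [] s) := by
    simp [pvDictOf, PySem.List.enumerate_nil, PySem.Dict.empty]
  rw [h0, pvLoop_inv _ [] s List.nodup_nil, PySem.Set.update_nil_left]
  rw [pvLoopB_inv (tt.flatMap (fun sentence => sentence)).length _ le_rfl _ _
    (fun x _ => PySem.Dict.contains_empty x)]
  simp [pvDictOf, PySem.List.dedup, PySem.Dict.empty]
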